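-- pv_equiv track=rewrite | github.com/MrBrantCode/unitest_baseline | mut_generate/mist_train_taco/taco_732/solution.py | find_max_subarray_indices
-- ===== SOURCE A (Python) =====
-- def find_max_subarray_indices(a, n):
--     # Initialize variables to store the best indices and the maximum value
--     best_l, best_r = 1, 1
--     max_value = -float('inf')
--
--     # Iterate over all possible subarrays
--     for l in range(n):
--         for r in range(l, n):
--             # Calculate the number of distinct elements in the subarray [a_l, a_{l+1}, ..., a_r]
--             distinct_elements = len(set(a[l:r+1]))
--             # Calculate the value of r - l - c(l, r)
--             current_value = r - l - distinct_elements
--             # Update the best indices if the current value is greater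
--             if current_value > max_value:
--                 max_value = current_value
--                 best_l, best_r = l + 1, r + 1  # Convert to 1-based index
--
--     return best_l, best_r
-- ===== SOURCE B (Python) =====
-- def find_max_subarray_indices(a, n):
--     # The value (r-l) - distinct(a[l:r+1]) is maximized at l=0 (shrinking l never
--     # hurts) and is nondecreasing in r, so A's first-max answer is l=1 with the
--     # smallest r whose value equals the full prefix's value: one left-to-right scan.
--     if n <= 0:
--         return (1, 1)
--     seen = set()
--     vals = []
--     for r in range(n):
--         if r < len(a):
--             seen.add(a[r])
--         vals.append(r - len(seen))
--     M = vals[-1]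
--     for i, v in enumerate(vals):
--         if v == M:
--             return (1, i + 1)
-- ===== Notes on version B (the rewrite author's own statement) =====
-- stated objective: faster
-- what changed: Replaced A's triple-nested scan over all subarrays (set built per pair) by a single left-to-right pass: the objective (r-l)-distinct is maximal at l=0 and nondecreasing in r, so the answer is l=1 together with the first r whose prefix value equals the full prefix's value.
import Mathlib
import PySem

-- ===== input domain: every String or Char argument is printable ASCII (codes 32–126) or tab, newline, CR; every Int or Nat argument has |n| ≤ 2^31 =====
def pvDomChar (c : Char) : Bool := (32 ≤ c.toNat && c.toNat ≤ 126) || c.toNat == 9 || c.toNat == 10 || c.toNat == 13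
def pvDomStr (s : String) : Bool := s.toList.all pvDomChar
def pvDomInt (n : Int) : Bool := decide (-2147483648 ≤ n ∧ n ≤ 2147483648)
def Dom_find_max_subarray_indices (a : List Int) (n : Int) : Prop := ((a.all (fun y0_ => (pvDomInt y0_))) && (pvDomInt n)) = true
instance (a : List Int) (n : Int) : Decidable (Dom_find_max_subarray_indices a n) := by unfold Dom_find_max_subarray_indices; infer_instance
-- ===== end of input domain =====

-- B replaces A's scan over all subarrays by one left-to-right pass (the objective is
-- maximal at l=0 and nondecreasing in r); a timing run reports it faster.

-- ===== PORT A =====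
-- A's float('-inf') sentinel is modelled as `none` (it is only ever compared with `>`,
-- where -inf loses to every int, exactly as `none` does here).
def pvStepA (a : List Int) (l : Int) (st : Int × Int × Option Int) (r : Int) : Int × Int × Option Int :=
  let distinct : Int := (PySem.Set.ofList (PySem.List.slice a (some l) (some (r + 1)))).length
  let cur := r - l - distinct
  match st.2.2 with
  | none => (l + 1, r + 1, some cur)
  | some m => if m < cur then (l + 1, r + 1, some cur) else st

def pvRowA (a : List Int) (n : Int) (st : Int × Int × Option Int) (l : Int) : Int × Int × Option Int :=
  (PySem.List.pyRange l n 1).foldl (pvStepA a l) st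

def find_max_subarray_indices (a : List Int) (n : Int) : List Int :=
  let st := (PySem.List.pyRange 0 n 1).foldl (pvRowA a n) (1, 1, none)
  [st.1, st.2.1]

-- ===== PORT B =====
-- Source B's `a[r]` is guarded by `r < len(a)`, so the in-range read is ported with pyGetD (exact there).
def pvStepB (a : List Int) (st : PySem.Set Int × List Int) (r : Int) : PySem.Set Int × List Int :=
  let seen := if r < (a.length : Int) then PySem.Set.add st.1 (PySem.List.pyGetD a r 0) else st.1
  (seen, st.2 ++ [r - (seen.length : Int)])

def find_max_subarray_indices_alt (a : List Int) (n : Int) : List Int :=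
  if n ≤ 0 then [1, 1]
  else
    let st := (PySem.List.pyRange 0 n 1).foldl (pvStepB a) (PySem.Set.empty, [])
    let M := st.2.getLast?.getD 0
    let i := st.2.findIdx (fun v => v == M)
    [1, (i : Int) + 1]

-- ===== PRECONDITION & SPEC =====
def Spec_find_max_subarray_indices (a : List Int) (n : Int) (out : List Int) : Prop := out = find_max_subarray_indices_alt a n
instance (a : List Int) (n : Int) (out : List Int) : Decidable (Spec_find_max_subarray_indices a n out) := by unfold Spec_find_max_subarray_indices; infer_instance

-- ===== CLAIM (what is proved, stated in full; the proofs are below) =====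
def Claim_equal_find_max_subarray_indices : Prop := ∀ (a : List Int) (n : Int), Dom_find_max_subarray_indices a n → Spec_find_max_subarray_indices a n (find_max_subarray_indices a n)

-- ===== LEMMAS AND PROOFS =====

-- value of the window a[l:r+1] : (r - l) - #distinct, in Nat coordinates
def pvW (a : List Int) (l r : Nat) : Int :=
  (r : Int) - (l : Int) - (((a.drop l).take (r + 1 - l)).toFinset.card : Int)

-- least j with prefix value equal to the prefix value at m
def pvRho (a : List Int) (m : Nat) : Nat :=
  Nat.find (p := fun j => pvW a 0 j = pvW a 0 m) ⟨m, rfl⟩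

lemma pv_ofList_length (ys : List Int) : (PySem.Set.ofList ys).length = ys.toFinset.card := by
  have h1 : (PySem.Set.ofList ys).toFinset = ys.toFinset := by
    ext x; simp [PySem.Set.mem_ofList]
  rw [← h1, List.toFinset_card_of_nodup (PySem.Set.nodup_ofList ys)]

lemma pv_ofList_concat (xs : List Int) (x : Int) :
    PySem.Set.ofList (xs ++ [x]) = PySem.Set.add (PySem.Set.ofList xs) x := by
  simp [PySem.Set.ofList_eq_foldl, List.foldl_append]

-- the port's `cur` at Nat coordinates is pvW
lemma pv_cur_eq (a : List Int) (l r : Nat) :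
    (r : Int) - (l : Int) - ((PySem.Set.ofList (PySem.List.slice a (some (l : Int)) (some ((r : Int) + 1)))).length : Int)
      = pvW a l r := by
  have hc : ((r : Int) + 1) = ((r + 1 : Nat) : Int) := by push_cast; ring
  rw [hc, PySem.List.slice_natCast, pv_ofList_length, pvW]

lemma pvStepA_apply_none (a : List Int) (l r : Nat) (x y : Int) :
    pvStepA a (l : Int) (x, y, none) (r : Int) = ((l : Int) + 1, (r : Int) + 1, some (pvW a l r)) := by
  simp only [pvStepA]
  rw [pv_cur_eq]

lemma pvStepA_apply_some (a : List Int) (l r : Nat) (x y m : Int) :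
    pvStepA a (l : Int) (x, y, some m) (r : Int) =
      if m < pvW a l r then ((l : Int) + 1, (r : Int) + 1, some (pvW a l r)) else (x, y, some m) := by
  simp only [pvStepA]
  rw [pv_cur_eq]

-- one more element on the right adds at most one distinct value
lemma pv_take_card_succ (xs : List Int) (k : Nat) :
    (xs.take (k + 1)).toFinset.card ≤ (xs.take k).toFinset.card + 1 := by
  rw [List.take_add_one, List.toFinset_append]
  refine le_trans (Finset.card_union_le _ _) ?_
  have : (xs[k]?.toList).toFinset.card ≤ 1 := by cases h : xs[k]? <;> simp
  omega

-- pvW a 0 · is nondecreasing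
lemma pvW_zero_succ (a : List Int) (r : Nat) : pvW a 0 r ≤ pvW a 0 (r + 1) := by
  have h := pv_take_card_succ a (r + 1)
  simp only [pvW, List.drop_zero, Nat.sub_zero]
  push_cast
  omega

lemma pvW_zero_mono (a : List Int) {r r' : Nat} (h : r ≤ r') : pvW a 0 r ≤ pvW a 0 r' := by
  induction r' with
  | zero => simp_all
  | succ k ih =>
    rcases Nat.lt_or_ge r (k + 1) with hlt | hge
    · exact le_trans (ih (by omega)) (pvW_zero_succ a k)
    · have : r = k + 1 := by omega
      subst this; rfl

-- moving the left end one step left never decreases the value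
lemma pvW_left_step (a : List Int) (l r : Nat) (h : l ≤ r) : pvW a (l + 1) r ≤ pvW a l r := by
  have hr1 : r + 1 - l = (r - l) + 1 := by omega
  rcases Nat.lt_or_ge l a.length with hl | hl
  · have hd : a.drop l = a[l] :: a.drop (l + 1) := List.drop_eq_getElem_cons hl
    have hcard : ((a.drop l).take (r + 1 - l)).toFinset.card
        ≤ ((a.drop (l + 1)).take (r - l)).toFinset.card + 1 := by
      rw [hd, hr1, List.take_succ_cons, List.toFinset_cons]
      exact Finset.card_insert_le _ _
    have h2 : r + 1 - (l + 1) = r - l := by omega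
    simp only [pvW, h2]
    push_cast
    omega
  · have h1 : a.drop l = [] := List.drop_eq_nil_of_le hl
    have h2 : a.drop (l + 1) = [] := List.drop_eq_nil_of_le (by omega)
    simp only [pvW, h1, h2, List.take_nil, List.toFinset_nil, Finset.card_empty]
    push_cast
    omega

lemma pvW_le_zero (a : List Int) {l r : Nat} (h : l ≤ r) : pvW a l r ≤ pvW a 0 r := by
  induction l with
  | zero => rfl
  | succ k ih => exact le_trans (pvW_left_step a k r (by omega)) (ih (by omega))

-- a fold whose step fixes the state is the identity
lemma pv_foldl_fix {α β : Type} (f : β → α → β) (s : β) (L : List α)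
    (h : ∀ x ∈ L, f s x = s) : L.foldl f s = s := by
  induction L with
  | nil => rfl
  | cons x t ih =>
    simp only [List.foldl_cons, h x (by simp)]
    exact ih (fun y hy => h y (by simp [hy]))

lemma pvRho_le (a : List Int) (m : Nat) : pvRho a m ≤ m :=
  Nat.find_min' (p := fun j => pvW a 0 j = pvW a 0 m) ⟨m, rfl⟩ rfl

lemma pvRho_spec (a : List Int) (m : Nat) : pvW a 0 (pvRho a m) = pvW a 0 m :=
  Nat.find_spec (p := fun j => pvW a 0 j = pvW a 0 m) ⟨m, rfl⟩

lemma pvRho_min (a : List Int) (m : Nat) {j : Nat} (hj : j < pvRho a m) : pvW a 0 j ≠ pvW a 0 m :=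
  Nat.find_min (p := fun j => pvW a 0 j = pvW a 0 m) ⟨m, rfl⟩ hj

lemma pvRho_congr (a : List Int) {m m' : Nat} (h : pvW a 0 m = pvW a 0 m') :
    pvRho a m = pvRho a m' := by
  rw [pvRho, Nat.find_eq_iff]
  exact ⟨(pvRho_spec a m').trans h.symm,
         fun k hk hc => pvRho_min a m' hk (hc.trans h)⟩

-- A's first row (l = 0) computes (1, ρ(m)+1, some (pvW a 0 m)) after processing r = 0..m
lemma pv_rowA_zero (a : List Int) (m : Nat) :
    ((List.range (m + 1)).map (fun k : Nat => (k : Int))).foldl (pvStepA a ((0 : Nat) : Int)) (1, 1, none)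
      = (1, ((pvRho a m : Nat) : Int) + 1, some (pvW a 0 m)) := by
  induction m with
  | zero =>
    have h0 : pvRho a 0 = 0 := Nat.le_zero.mp (pvRho_le a 0)
    rw [List.range_one]
    simp only [List.map_cons, List.map_nil, List.foldl_cons, List.foldl_nil]
    rw [pvStepA_apply_none a 0 0, h0]
    norm_num
  | succ m ih =>
    rw [List.range_succ, List.map_append, List.foldl_append, ih]
    simp only [List.map_cons, List.map_nil, List.foldl_cons, List.foldl_nil]
    rw [pvStepA_apply_some a 0 (m + 1)]
    have hmono := pvW_zero_succ a m
    by_cases hlt : pvW a 0 m < pvW a 0 (m + 1)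
    · have hrho : pvRho a (m + 1) = m + 1 := by
        rw [pvRho, Nat.find_eq_iff]
        refine ⟨rfl, fun j hj => ?_⟩
        have : pvW a 0 j ≤ pvW a 0 m := pvW_zero_mono a (by omega)
        omega
      simp [hlt, hrho]
    · have heq : pvW a 0 (m + 1) = pvW a 0 m := by omega
      simp [heq, pvRho_congr a heq]

-- B's fold invariant: after processing r = 0..k-1, seen = set(a[:k]) and vals = prefix values
lemma pv_foldB (a : List Int) (k : Nat) :
    ((List.range k).map (fun j : Nat => (j : Int))).foldl (pvStepB a) (PySem.Set.empty, [])
      = (PySem.Set.ofList (a.take k), (List.range k).map (fun j : Nat => pvW a 0 j)) := by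
  induction k with
  | zero => simp [PySem.Set.empty, PySem.Set.ofList]
  | succ k ih =>
    rw [List.range_succ, List.map_append, List.foldl_append, ih]
    simp only [List.map_cons, List.map_nil, List.foldl_cons, List.foldl_nil, pvStepB]
    have hseen : (if ((k : Nat) : Int) < (a.length : Int)
        then PySem.Set.add (PySem.Set.ofList (a.take k)) (PySem.List.pyGetD a ((k : Nat) : Int) 0)
        else PySem.Set.ofList (a.take k)) = PySem.Set.ofList (a.take (k + 1)) := by
      by_cases hk : k < a.length
      · rw [if_pos (by exact_mod_cast hk), PySem.List.pyGetD_natCast]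
        rw [List.take_add_one, List.getElem?_eq_getElem hk]
        rw [show a.getD k 0 = a[k] from List.getD_eq_getElem a 0 hk]
        exact (pv_ofList_concat _ _).symm
      · rw [if_neg (by exact_mod_cast hk),
          List.take_of_length_le (by omega), List.take_of_length_le (by omega)]
    rw [hseen]
    have hval : ((k : Nat) : Int) - ((PySem.Set.ofList (a.take (k + 1))).length : Int)
        = pvW a 0 k := by
      rw [pv_ofList_length, pvW]
      simp only [List.drop_zero, Nat.sub_zero, Nat.cast_zero]
      ring
    rw [hval]
    simp

-- A's whole computation, for n = N > 0
lemma pv_A_closed (a : List Int) (n : Int) (N : Nat) (hN : n = (N : Int)) (hpos : 0 < N) :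
    find_max_subarray_indices a n = [1, ((pvRho a (N - 1) : Nat) : Int) + 1] := by
  obtain ⟨K, rfl⟩ : ∃ K, N = K + 1 := ⟨N - 1, by omega⟩
  have hrange : PySem.List.pyRange 0 n 1 = (List.range (K + 1)).map (fun k : Nat => (k : Int)) := by
    rw [PySem.List.pyRange_one]
    simp [hN]
  have hM : pvW a 0 (K + 1 - 1) = pvW a 0 K := by norm_num
  -- the first row yields the final state
  have hrow0 : pvRowA a n (1, 1, none) ((0 : Nat) : Int)
      = (1, ((pvRho a K : Nat) : Int) + 1, some (pvW a 0 K)) := by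
    rw [pvRowA]
    have : PySem.List.pyRange ((0 : Nat) : Int) n 1 = (List.range (K + 1)).map (fun k : Nat => (k : Int)) := by
      simpa using hrange
    rw [this]
    exact pv_rowA_zero a K
  -- every later row leaves the state unchanged
  have hfix : ∀ (l : Nat),
      pvRowA a n (1, ((pvRho a K : Nat) : Int) + 1, some (pvW a 0 K)) ((l : Nat) : Int)
        = (1, ((pvRho a K : Nat) : Int) + 1, some (pvW a 0 K)) := by
    intro l
    rw [pvRowA]
    apply pv_foldl_fix
    intro r hr
    rw [PySem.List.mem_pyRange_one] at hr
    obtain ⟨hlr, hrn⟩ := hr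
    have hr0 : 0 ≤ r := le_trans (by exact_mod_cast Nat.zero_le l) hlr
    obtain ⟨rn, rfl⟩ : ∃ rn : Nat, r = (rn : Int) := ⟨r.toNat, (Int.toNat_of_nonneg hr0).symm⟩
    have hlrn : l ≤ rn := by exact_mod_cast hlr
    have hrnN : rn < K + 1 := by rw [hN] at hrn; exact_mod_cast hrn
    have hle : pvW a l rn ≤ pvW a 0 K :=
      le_trans (pvW_le_zero a hlrn) (pvW_zero_mono a (by omega))
    rw [pvStepA_apply_some a l rn]
    rw [if_neg (by omega)]
  -- assemble the outer fold
  rw [find_max_subarray_indices, hrange, List.range_succ_eq_map]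
  simp only [List.map_cons, List.map_map, List.foldl_cons, Nat.cast_zero]
  rw [show pvRowA a n (1, 1, none) 0 = pvRowA a n (1, 1, none) ((0 : Nat) : Int) by norm_num,
    hrow0]
  rw [pv_foldl_fix _ _ _ (fun x hx => by
    obtain ⟨k, _, rfl⟩ := List.mem_map.mp hx
    exact hfix (Nat.succ k))]
  norm_num

-- B's whole computation, for n = N > 0
lemma pv_B_closed (a : List Int) (n : Int) (N : Nat) (hN : n = (N : Int)) (hpos : 0 < N) :
    find_max_subarray_indices_alt a n = [1, ((pvRho a (N - 1) : Nat) : Int) + 1] := by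
  obtain ⟨K, rfl⟩ : ∃ K, N = K + 1 := ⟨N - 1, by omega⟩
  have hn0 : ¬ n ≤ 0 := by rw [hN]; push_cast; omega
  have hrange : PySem.List.pyRange 0 n 1 = (List.range (K + 1)).map (fun k : Nat => (k : Int)) := by
    rw [PySem.List.pyRange_one]
    simp [hN]
  rw [find_max_subarray_indices_alt, if_neg hn0, hrange, pv_foldB a (K + 1)]
  have hvals : (List.range (K + 1)).map (fun j : Nat => pvW a 0 j)
      = (List.range K).map (fun j : Nat => pvW a 0 j) ++ [pvW a 0 K] := by
    rw [List.range_succ, List.map_append]; rfl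
  simp only [hvals]
  rw [List.getLast?_concat]
  have hlen : ((List.range K).map (fun j : Nat => pvW a 0 j) ++ [pvW a 0 K]).length = K + 1 := by
    simp
  have hρ : pvRho a K < K + 1 := by have := pvRho_le a K; omega
  have hfind : ((List.range K).map (fun j : Nat => pvW a 0 j) ++ [pvW a 0 K]).findIdx
      (fun v => v == pvW a 0 K) = pvRho a K := by
    rw [← hvals]
    have hρ' : pvRho a K < ((List.range (K + 1)).map (fun j : Nat => pvW a 0 j)).length := by
      simp [hρ]
    rw [List.findIdx_eq hρ']
    constructor
    · have : ((List.range (K + 1)).map (fun j : Nat => pvW a 0 j))[pvRho a K]'hρ' = pvW a 0 (pvRho a K) := by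
        simp
      rw [this]
      simp [pvRho_spec a K]
    · intro j hj
      have hjK : j < K + 1 := by omega
      have : ((List.range (K + 1)).map (fun j : Nat => pvW a 0 j))[j]'(by simp [hjK]) = pvW a 0 j := by
        simp
      rw [this]
      simp [pvRho_min a K hj]
  simp only [Option.getD_some, hfind]
  norm_num

-- ===== VERDICT (by name: the statement is the Claim_ definition above) =====
theorem find_max_subarray_indices_spec : Claim_equal_find_max_subarray_indices := by
  intro a n _
  unfold Spec_find_max_subarray_indices
  by_cases hn : n ≤ 0
  · have hempty : PySem.List.pyRange 0 n 1 = [] := by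
      rw [PySem.List.pyRange_one]
      have hz : (n - 0).toNat = 0 := by omega
      rw [hz, List.range_zero, List.map_nil]
    rw [find_max_subarray_indices, find_max_subarray_indices_alt, hempty, if_pos hn]
    rfl
  · have hN : n = (n.toNat : Int) := (Int.toNat_of_nonneg (by omega)).symm
    have hpos : 0 < n.toNat := by omega
    rw [pv_A_closed a n n.toNat hN hpos, pv_B_closed a n n.toNat hN hpos]
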